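-- pv_equiv track=rewrite | github.com/AbubakerBaiga/MDST | stepcounter (1).py | generate_step_array
-- ===== SOURCE A (Python) =====
-- def generate_step_array(timestamps, step_time):
--   s_arr = []
--   ctr = 0
--   for i, time in enumerate(timestamps):
--     if(ctr<len(step_time) and step_time[ctr]<=time):
--       ctr += 1
--       s_arr.append( 30 )
--     else:
--       s_arr.append( 0 )
--   while(len(s_arr)<len(timestamps)):
--     s_arr.append(0)
--   return s_arr
-- ===== SOURCE B (Python) =====
-- def generate_step_array(timestamps, step_time):
--     s_arr = [0] * len(timestamps)
--     j = 0
--     for st in step_time: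
--         while j < len(timestamps) and timestamps[j] < st:
--             j += 1
--         if j < len(timestamps):
--             s_arr[j] = 30
--             j += 1
--         else:
--             break
--     return s_arr
-- ===== Notes on version B (the rewrite author's own statement) =====
-- stated objective: alternative
-- what changed: B inverts the loop structure: instead of iterating timestamps with a step counter, it zero-initialises the output and iterates step_time, advancing a timestamp pointer with an inner while and setting 30 in place, breaking early when timestamps are exhausted.
import Mathlib
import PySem

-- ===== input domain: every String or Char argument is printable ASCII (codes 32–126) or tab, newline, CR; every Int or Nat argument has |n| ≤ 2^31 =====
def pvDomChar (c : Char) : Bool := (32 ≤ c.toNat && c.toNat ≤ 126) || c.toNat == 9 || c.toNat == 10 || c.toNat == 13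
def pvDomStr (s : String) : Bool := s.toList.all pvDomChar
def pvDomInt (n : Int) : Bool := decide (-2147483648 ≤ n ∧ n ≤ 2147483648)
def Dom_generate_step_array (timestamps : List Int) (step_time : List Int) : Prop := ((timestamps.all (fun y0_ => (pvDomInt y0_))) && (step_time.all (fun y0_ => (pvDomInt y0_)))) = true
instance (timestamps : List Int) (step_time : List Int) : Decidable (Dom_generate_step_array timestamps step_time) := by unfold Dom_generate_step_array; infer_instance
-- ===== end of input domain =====

-- B reverses the loop structure: it iterates step_time over a zero-initialised array with a
-- timestamp pointer, instead of A's iteration over timestamps with a step counter (objective: alternative).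

-- ===== PORT A =====
-- A's loop body: state = (s_arr, ctr); the guard ctr < len(step_time) ensures step_time[ctr] is in range.
def gsaStepA (steps : List Int) (acc : List Int × Nat) (time : Int) : List Int × Nat :=
  if acc.2 < steps.length ∧ steps.getD acc.2 0 ≤ time then (acc.1 ++ [30], acc.2 + 1)
  else (acc.1 ++ [0], acc.2)

def generate_step_array (timestamps : List Int) (step_time : List Int) : List Int :=
  let p := timestamps.foldl (gsaStepA step_time) ([], 0)
  -- trailing while: pad s_arr with zeros up to len(timestamps)
  p.1 ++ List.replicate (timestamps.length - p.1.length) 0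

-- ===== PORT B =====
-- inner while: advance j past timestamps strictly below st
def gsaAdvance (ts : List Int) (st : Int) (j : Nat) : Nat :=
  if h : j < ts.length ∧ ts.getD j 0 < st then gsaAdvance ts st (j + 1) else j
termination_by ts.length - j
decreasing_by omega

def gsaLoop (ts : List Int) (steps : List Int) (j : Nat) (s : List Int) : List Int :=
  match steps with
  | [] => s
  | st :: rest =>
    let j' := gsaAdvance ts st j
    if j' < ts.length then gsaLoop ts rest (j' + 1) (s.set j' 30) else s

def generate_step_array_alt (timestamps : List Int) (step_time : List Int) : List Int :=
  gsaLoop timestamps step_time 0 (List.replicate timestamps.length 0)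

-- ===== PRECONDITION & SPEC =====
def Spec_generate_step_array (timestamps : List Int) (step_time : List Int) (out : List Int) : Prop := out = generate_step_array_alt timestamps step_time
instance (timestamps : List Int) (step_time : List Int) (out : List Int) : Decidable (Spec_generate_step_array timestamps step_time out) := by unfold Spec_generate_step_array; infer_instance

-- ===== CLAIM (what is proved, stated in full; the proofs are below) =====
def Claim_equal_generate_step_array : Prop := ∀ (timestamps : List Int) (step_time : List Int), Dom_generate_step_array timestamps step_time → Spec_generate_step_array timestamps step_time (generate_step_array timestamps step_time)

-- ===== LEMMAS AND PROOFS =====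

-- reference merge both ports are reduced to
def gsaMerge : List Int → List Int → List Int
  | [], _ => []
  | _ :: ts, [] => 0 :: gsaMerge ts []
  | t :: ts, s :: ss => if s ≤ t then 30 :: gsaMerge ts ss else 0 :: gsaMerge ts (s :: ss)

theorem gsaMerge_length (ts ss : List Int) : (gsaMerge ts ss).length = ts.length := by
  fun_induction gsaMerge ts ss <;> simp_all

theorem gsaMerge_nil (ts : List Int) : gsaMerge ts [] = List.replicate ts.length 0 := by
  induction ts with
  | nil => rfl
  | cons t ts ih => simp [gsaMerge, ih, List.replicate_succ]

theorem foldlA_eq (steps : List Int) (ts : List Int) :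
    ∀ (acc : List Int) (ctr : Nat),
      (ts.foldl (gsaStepA steps) (acc, ctr)).1 = acc ++ gsaMerge ts (steps.drop ctr) := by
  induction ts with
  | nil => intro acc ctr; simp [gsaMerge]
  | cons t ts ih =>
    intro acc ctr
    by_cases h1 : ctr < steps.length ∧ steps.getD ctr 0 ≤ t
    · have hstep : gsaStepA steps (acc, ctr) t = (acc ++ [30], ctr + 1) := by
        simp only [gsaStepA, if_pos h1]
      have h2 : steps[ctr] ≤ t := by
        rw [← List.getD_eq_getElem steps 0 h1.1]; exact h1.2
      rw [List.foldl_cons, hstep, ih, List.drop_eq_getElem_cons h1.1]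
      simp only [gsaMerge, if_pos h2, List.append_assoc, List.singleton_append]
    · have hstep : gsaStepA steps (acc, ctr) t = (acc ++ [0], ctr) := by
        simp only [gsaStepA, if_neg h1]
      rw [List.foldl_cons, hstep, ih]
      by_cases hc : ctr < steps.length
      · have h2 : ¬ steps[ctr] ≤ t := by
          rw [← List.getD_eq_getElem steps 0 hc]
          exact fun hh => h1 ⟨hc, hh⟩
        rw [List.drop_eq_getElem_cons hc]
        simp only [gsaMerge, if_neg h2, List.append_assoc, List.singleton_append]
      · have hdrop : steps.drop ctr = [] := List.drop_eq_nil_of_le (by omega)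
        rw [hdrop]
        simp only [gsaMerge, List.append_assoc, List.singleton_append]

theorem genA_eq (ts steps : List Int) : generate_step_array ts steps = gsaMerge ts steps := by
  have h := foldlA_eq steps ts [] 0
  simp only [List.drop_zero, List.nil_append] at h
  simp only [generate_step_array, h, gsaMerge_length]
  simp

theorem gsaAdvance_ge (ts : List Int) (st : Int) (j : Nat) : j ≤ gsaAdvance ts st j := by
  fun_induction gsaAdvance ts st j with
  | case1 j h ih => omega
  | case2 j h => omega

theorem gsaAdvance_le (ts : List Int) (st : Int) (j : Nat) (hj : j ≤ ts.length) :
    gsaAdvance ts st j ≤ ts.length := by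
  fun_induction gsaAdvance ts st j with
  | case1 j h ih => exact ih (by omega)
  | case2 j h => exact hj

theorem gsaAdvance_hit (ts : List Int) (st : Int) (j : Nat)
    (h : gsaAdvance ts st j < ts.length) : st ≤ ts.getD (gsaAdvance ts st j) 0 := by
  fun_induction gsaAdvance ts st j with
  | case1 j hc ih => exact ih h
  | case2 j hc =>
    by_contra hlt
    exact hc ⟨h, by omega⟩

theorem gsaMerge_advance (ts : List Int) (st : Int) (rest : List Int) (j : Nat) :
    gsaMerge (ts.drop j) (st :: rest) =
      List.replicate (gsaAdvance ts st j - j) 0 ++ gsaMerge (ts.drop (gsaAdvance ts st j)) (st :: rest) := by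
  fun_induction gsaAdvance ts st j with
  | case1 j hc ih =>
    have hj : j < ts.length := hc.1
    have hlt : ¬ st ≤ ts[j] := by
      rw [← List.getD_eq_getElem ts 0 hj]; omega
    have hge : j + 1 ≤ gsaAdvance ts st (j + 1) := gsaAdvance_ge ts st (j + 1)
    rw [List.drop_eq_getElem_cons hj]
    simp only [gsaMerge, if_neg hlt]
    rw [ih]
    have hrep : gsaAdvance ts st (j + 1) - j = (gsaAdvance ts st (j + 1) - (j + 1)) + 1 := by omega
    rw [hrep, List.replicate_succ]
    simp
  | case2 j hc => simp

theorem gsaReplicate_set (n k : Nat) (hk : k < n) :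
    (List.replicate n (0 : Int)).set k 30 =
      List.replicate k 0 ++ 30 :: List.replicate (n - (k + 1)) 0 := by
  rw [List.set_eq_take_cons_drop _ (by simpa using hk)]
  simp [List.take_replicate, List.drop_replicate, Nat.min_eq_left (le_of_lt hk)]

theorem gsaLoop_eq (steps : List Int) (ts : List Int) :
    ∀ (j : Nat) (P : List Int), P.length = j → j ≤ ts.length →
      gsaLoop ts steps j (P ++ List.replicate (ts.length - j) 0) =
        P ++ gsaMerge (ts.drop j) steps := by
  induction steps with
  | nil =>
    intro j P hP hj
    simp [gsaLoop, gsaMerge_nil]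
  | cons st rest ih =>
    intro j P hP hj
    have hge : j ≤ gsaAdvance ts st j := gsaAdvance_ge ts st j
    have hle : gsaAdvance ts st j ≤ ts.length := gsaAdvance_le ts st j hj
    set j' := gsaAdvance ts st j with hj'
    rw [gsaMerge_advance ts st rest j, ← hj']
    by_cases hlt : j' < ts.length
    · have hset :
        (P ++ List.replicate (ts.length - j) 0).set j' 30 =
          (P ++ List.replicate (j' - j) 0 ++ [30]) ++ List.replicate (ts.length - (j' + 1)) 0 := by
        rw [List.set_append_right _ _ (by omega)]
        rw [hP, gsaReplicate_set (ts.length - j) (j' - j) (by omega)]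
        have h1 : ts.length - j - (j' - j + 1) = ts.length - (j' + 1) := by omega
        simp [h1]
      simp only [gsaLoop, ← hj', if_pos hlt, hset]
      rw [ih (j' + 1) (P ++ List.replicate (j' - j) 0 ++ [30]) (by simp [hP]; omega) (by omega)]
      have hhit : st ≤ ts[j'] := by
        rw [← List.getD_eq_getElem ts 0 hlt]
        exact gsaAdvance_hit ts st j hlt
      rw [List.drop_eq_getElem_cons hlt]
      simp only [gsaMerge, if_pos hhit, List.append_assoc, List.cons_append, List.nil_append]
    · have hjl : j' = ts.length := by omega
      simp only [gsaLoop, ← hj', if_neg hlt]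
      rw [hjl]
      simp [gsaMerge, List.drop_length]

theorem genB_eq (ts steps : List Int) : generate_step_array_alt ts steps = gsaMerge ts steps := by
  have h := gsaLoop_eq steps ts 0 [] rfl (by omega)
  simpa [generate_step_array_alt] using h

-- ===== VERDICT (by name: the statement is the Claim_ definition above) =====
theorem generate_step_array_spec : Claim_equal_generate_step_array := by
  intro ts steps _
  unfold Spec_generate_step_array
  rw [genA_eq, genB_eq]
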